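-- pv_equiv track=rewrite | github.com/dnfollwm07/software_analysis_final_project | src/dynamic_analysis/test_generator.py | _generate_cpp_test_inputs
-- ===== SOURCE A (Python) =====
-- from typing import List, Dict, Any, Optional
--
-- def _generate_cpp_test_inputs(args: List[str], return_type: str) -> Dict[str, str]:
--     """
--     Generate test inputs for C++ function arguments.
--
--     Args:
--         args: List of argument names
--         return_type: Function return type
--
--     Returns:
--         Dictionary mapping argument names to test values (as strings)
--     """
--     inputs = {}
--
--     for arg in args:
--         # Generate a simple value based on argument name
--         if "id" in arg.lower() or "index" in arg.lower():
--             inputs[arg] = "1"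
--         elif "name" in arg.lower() or "str" in arg.lower():
--             inputs[arg] = '"test"'
--         elif "list" in arg.lower() or "array" in arg.lower():
--             inputs[arg] = "{1, 2, 3}"
--         elif "bool" in arg.lower() or "flag" in arg.lower():
--             inputs[arg] = "true"
--         elif "float" in arg.lower() or "double" in arg.lower():
--             inputs[arg] = "1.0"
--         else:
--             inputs[arg] = "0"
--
--     return inputs
-- ===== SOURCE B (Python) =====
-- from typing import List, Dict
--
-- _RULES = [
--     (("id", "index"), "1"),
--     (("name", "str"), '"test"'),
--     (("list", "array"), "{1, 2, 3}"),
--     (("bool", "flag"), "true"),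
--     (("float", "double"), "1.0"),
-- ]
--
-- def _generate_cpp_test_inputs(args: List[str], return_type: str) -> Dict[str, str]:
--     # Stage 1: default every argument to "0".
--     # Stage 2: sweep the rules in INCREASING precedence, overwriting the value
--     # of every matching argument, so the highest-precedence match wins last.
--     inputs = {arg: "0" for arg in args}
--     for keywords, value in reversed(_RULES):
--         for arg in inputs:
--             if any(k in arg.lower() for k in keywords):
--                 inputs[arg] = value
--     return inputs
-- ===== Notes on version B (the rewrite author's own statement) =====
-- stated objective: alternative
-- what changed: Instead of classifying each argument once through the elif chain, B defaults every argument to "0" and then sweeps the rule table in increasing precedence, overwriting the value of every matching argument so the highest-precedence match wins last.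
import Mathlib
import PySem

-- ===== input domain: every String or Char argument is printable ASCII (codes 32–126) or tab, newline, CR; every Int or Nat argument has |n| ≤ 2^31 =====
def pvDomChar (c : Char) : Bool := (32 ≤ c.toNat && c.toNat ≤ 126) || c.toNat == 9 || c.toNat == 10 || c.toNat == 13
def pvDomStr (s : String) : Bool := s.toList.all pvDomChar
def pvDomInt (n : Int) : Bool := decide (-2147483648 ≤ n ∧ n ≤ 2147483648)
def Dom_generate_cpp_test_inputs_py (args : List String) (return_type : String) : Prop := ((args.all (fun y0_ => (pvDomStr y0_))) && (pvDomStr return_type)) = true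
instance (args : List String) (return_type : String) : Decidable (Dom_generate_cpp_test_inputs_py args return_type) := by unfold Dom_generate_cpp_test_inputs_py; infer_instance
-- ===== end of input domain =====

-- B replaces A's per-argument elif classification by two stages: default all args to "0",
-- then sweep the rules in increasing precedence, overwriting matches (simpler, data-driven).

-- ===== PORT A =====
-- literal transliteration of A's elif chain, folding over args with dict insertion
def generate_cpp_test_inputs_py (args : List String) (return_type : String) : List (String × String) :=
  (args.foldl (fun (inputs : PySem.Dict String String) arg =>
    if PySem.Str.isIn "id" (PySem.Str.lower arg) || PySem.Str.isIn "index" (PySem.Str.lower arg) then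
      inputs.insert arg "1"
    else if PySem.Str.isIn "name" (PySem.Str.lower arg) || PySem.Str.isIn "str" (PySem.Str.lower arg) then
      inputs.insert arg "\"test\""
    else if PySem.Str.isIn "list" (PySem.Str.lower arg) || PySem.Str.isIn "array" (PySem.Str.lower arg) then
      inputs.insert arg "{1, 2, 3}"
    else if PySem.Str.isIn "bool" (PySem.Str.lower arg) || PySem.Str.isIn "flag" (PySem.Str.lower arg) then
      inputs.insert arg "true"
    else if PySem.Str.isIn "float" (PySem.Str.lower arg) || PySem.Str.isIn "double" (PySem.Str.lower arg) then
      inputs.insert arg "1.0"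
    else
      inputs.insert arg "0") PySem.Dict.empty).items

-- ===== PORT B =====
-- B-side rule table (Source B's _RULES)
def pvRules : List (List String × String) :=
  [(["id", "index"], "1"),
   (["name", "str"], "\"test\""),
   (["list", "array"], "{1, 2, 3}"),
   (["bool", "flag"], "true"),
   (["float", "double"], "1.0")]

-- Source B: 'if any(k in arg.lower() for k in keywords)'
def pvMatch (keywords : List String) (arg : String) : Bool :=
  keywords.any (fun k => PySem.Str.isIn k (PySem.Str.lower arg))

-- Source B: one overwrite sweep 'for arg in inputs: if match: inputs[arg] = value'
-- (iterating the dict's keys; a value overwrite keeps the key list unchanged)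
def pvSweep (rule : List String × String) (inputs : PySem.Dict String String) : PySem.Dict String String :=
  inputs.keys.foldl (fun d arg => if pvMatch rule.1 arg then d.insert arg rule.2 else d) inputs

def generate_cpp_test_inputs_py_alt (args : List String) (return_type : String) : List (String × String) :=
  -- {arg: "0" for arg in args}
  let base := args.foldl (fun (d : PySem.Dict String String) arg => d.insert arg "0") PySem.Dict.empty
  -- for keywords, value in reversed(_RULES): sweep
  (pvRules.reverse.foldl (fun inputs rule => pvSweep rule inputs) base).items

-- ===== PRECONDITION & SPEC =====
def Spec_generate_cpp_test_inputs_py (args : List String) (return_type : String) (out : List (String × String)) : Prop := out = generate_cpp_test_inputs_py_alt args return_type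
instance (args : List String) (return_type : String) (out : List (String × String)) : Decidable (Spec_generate_cpp_test_inputs_py args return_type out) := by unfold Spec_generate_cpp_test_inputs_py; infer_instance

-- ===== CLAIM (what is proved, stated in full; the proofs are below) =====
def Claim_equal_generate_cpp_test_inputs_py : Prop := ∀ (args : List String) (return_type : String), Dom_generate_cpp_test_inputs_py args return_type → Spec_generate_cpp_test_inputs_py args return_type (generate_cpp_test_inputs_py args return_type)

-- ===== LEMMAS AND PROOFS =====

-- A's elif chain as a per-argument value function
def pvChain (arg : String) : String :=
  if PySem.Str.isIn "id" (PySem.Str.lower arg) || PySem.Str.isIn "index" (PySem.Str.lower arg) then "1"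
  else if PySem.Str.isIn "name" (PySem.Str.lower arg) || PySem.Str.isIn "str" (PySem.Str.lower arg) then "\"test\""
  else if PySem.Str.isIn "list" (PySem.Str.lower arg) || PySem.Str.isIn "array" (PySem.Str.lower arg) then "{1, 2, 3}"
  else if PySem.Str.isIn "bool" (PySem.Str.lower arg) || PySem.Str.isIn "flag" (PySem.Str.lower arg) then "true"
  else if PySem.Str.isIn "float" (PySem.Str.lower arg) || PySem.Str.isIn "double" (PySem.Str.lower arg) then "1.0"
  else "0"

-- B's overwrite sweeps as a per-argument value function
def pvOverwrite (arg : String) : String :=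
  pvRules.reverse.foldl (fun v rule => if pvMatch rule.1 arg then rule.2 else v) "0"

-- per-argument: the last matching rule of the reversed sweep is the first of A's chain
theorem pvChain_eq_pvOverwrite (arg : String) : pvChain arg = pvOverwrite arg := by
  simp only [pvChain, pvOverwrite, pvRules, pvMatch, List.reverse_cons, List.reverse_nil,
    List.nil_append, List.cons_append, List.foldl_cons, List.foldl_nil,
    List.any_cons, List.any_nil, Bool.or_false]

-- A's fold is the fold inserting pvChain
theorem pvA_fold (args : List String) (d : PySem.Dict String String) :
    args.foldl (fun (inputs : PySem.Dict String String) arg =>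
      if PySem.Str.isIn "id" (PySem.Str.lower arg) || PySem.Str.isIn "index" (PySem.Str.lower arg) then inputs.insert arg "1"
      else if PySem.Str.isIn "name" (PySem.Str.lower arg) || PySem.Str.isIn "str" (PySem.Str.lower arg) then inputs.insert arg "\"test\""
      else if PySem.Str.isIn "list" (PySem.Str.lower arg) || PySem.Str.isIn "array" (PySem.Str.lower arg) then inputs.insert arg "{1, 2, 3}"
      else if PySem.Str.isIn "bool" (PySem.Str.lower arg) || PySem.Str.isIn "flag" (PySem.Str.lower arg) then inputs.insert arg "true"
      else if PySem.Str.isIn "float" (PySem.Str.lower arg) || PySem.Str.isIn "double" (PySem.Str.lower arg) then inputs.insert arg "1.0"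
      else inputs.insert arg "0") d
    = args.foldl (fun (inputs : PySem.Dict String String) arg => inputs.insert arg (pvChain arg)) d := by
  induction args generalizing d with
  | nil => rfl
  | cons a rest ih =>
    simp only [List.foldl]
    rw [← ih]
    congr 1
    unfold pvChain
    split_ifs <;> rfl

-- lookup after a fold that never inserts at x
theorem pvGetD_fold_insert_not_mem (l : List String) (f : String → String) :
    ∀ (d : PySem.Dict String String) (x : String), x ∉ l →
    (l.foldl (fun (d : PySem.Dict String String) a => d.insert a (f a)) d).getD x "0" = d.getD x "0" := by
  induction l with
  | nil => intro d x _; rfl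
  | cons a rest ih =>
    intro d x hx
    simp only [List.foldl]
    rw [ih _ x (fun h => hx (List.mem_cons_of_mem _ h)), PySem.Dict.getD_insert]
    have hne : x ≠ a := by rintro rfl; exact hx List.mem_cons_self
    simp [hne]

-- lookup after a fold inserting f a at every a
theorem pvGetD_fold_insert_mem (l : List String) (f : String → String) :
    ∀ (d : PySem.Dict String String) (x : String), x ∈ l →
    (l.foldl (fun (d : PySem.Dict String String) a => d.insert a (f a)) d).getD x "0" = f x := by
  induction l with
  | nil => intro d x hx; cases hx
  | cons a rest ih =>
    intro d x hx
    simp only [List.foldl]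
    by_cases hr : x ∈ rest
    · exact ih _ x hr
    · have hxa : x = a := by rcases List.mem_cons.mp hx with h | h; exact h; exact absurd h hr
      subst hxa
      rw [pvGetD_fold_insert_not_mem rest f _ x hr, PySem.Dict.getD_insert]
      simp

-- one sweep over a key list ks: value at x becomes rule.2 when x ∈ ks matches
theorem pvGetD_sweepFold (rule : List String × String) (ks : List String) :
    ∀ (d : PySem.Dict String String) (x : String),
    (ks.foldl (fun d arg => if pvMatch rule.1 arg then d.insert arg rule.2 else d) d).getD x "0"
      = if x ∈ ks ∧ pvMatch rule.1 x then rule.2 else d.getD x "0" := by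
  induction ks with
  | nil => intro d x; simp
  | cons a rest ih =>
    intro d x
    simp only [List.foldl]
    rw [ih]
    by_cases hm : pvMatch rule.1 x = true
    · by_cases hr : x ∈ rest
      · simp [hr, hm]
      · by_cases hxa : x = a
        · subst hxa
          simp [hr, hm]
        · have hx : x ∉ a :: rest := by simp [hxa, hr]
          cases hma : pvMatch rule.1 a
          · simp [hr, hm, hx]
          · simp [hr, hm, hx, PySem.Dict.getD_insert, hxa]
    · by_cases hxa : x = a
      · subst hxa
        simp [hm]
      · cases hma : pvMatch rule.1 a
        · simp [hm]
        · simp [hm, PySem.Dict.getD_insert, hxa]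

-- a sweep over ks ⊆ keys d keeps the key list
theorem pvKeys_sweepFold (rule : List String × String) (ks : List String) :
    ∀ (d : PySem.Dict String String), (∀ a ∈ ks, d.contains a = true) →
    (ks.foldl (fun d arg => if pvMatch rule.1 arg then d.insert arg rule.2 else d) d).keys = d.keys := by
  induction ks with
  | nil => intro d _; rfl
  | cons a rest ih =>
    intro d h
    have ha := h a List.mem_cons_self
    simp only [List.foldl]
    cases hm : pvMatch rule.1 a
    · simp only [Bool.false_eq_true, if_false]
      exact ih d (fun b hb => h b (List.mem_cons_of_mem _ hb))
    · simp only [if_true]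
      rw [ih]
      · exact PySem.Dict.keys_insert_of_contains d rule.2 ha
      · intro b hb
        rw [PySem.Dict.contains_insert]
        simp [h b (List.mem_cons_of_mem _ hb)]

theorem pvKeys_sweep (rule : List String × String) (d : PySem.Dict String String) :
    (pvSweep rule d).keys = d.keys := by
  unfold pvSweep
  exact pvKeys_sweepFold rule d.keys d
    (fun a ha => (PySem.Dict.contains_iff_mem_keys d a).mpr ha)

theorem pvGetD_sweep (rule : List String × String) (d : PySem.Dict String String)
    (x : String) (hx : x ∈ d.keys) :
    (pvSweep rule d).getD x "0" = if pvMatch rule.1 x then rule.2 else d.getD x "0" := by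
  unfold pvSweep
  rw [pvGetD_sweepFold]
  simp [hx]

-- all sweeps: value at a key is the overwrite fold over the rules
theorem pvGetD_sweeps (rs : List (List String × String)) :
    ∀ (d : PySem.Dict String String) (x : String), x ∈ d.keys →
    (rs.foldl (fun inputs rule => pvSweep rule inputs) d).getD x "0"
      = rs.foldl (fun v rule => if pvMatch rule.1 x then rule.2 else v) (d.getD x "0") := by
  induction rs with
  | nil => intro d x _; rfl
  | cons r rest ih =>
    intro d x hx
    simp only [List.foldl]
    rw [ih (pvSweep r d) x (by rw [pvKeys_sweep]; exact hx), pvGetD_sweep r d x hx]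

theorem pvKeys_sweeps (rs : List (List String × String)) (d : PySem.Dict String String) :
    (rs.foldl (fun inputs rule => pvSweep rule inputs) d).keys = d.keys := by
  induction rs generalizing d with
  | nil => rfl
  | cons r rest ih => simp only [List.foldl]; rw [ih, pvKeys_sweep]

-- ===== VERDICT (by name: the statement is the Claim_ definition above) =====
theorem generate_cpp_test_inputs_py_spec : Claim_equal_generate_cpp_test_inputs_py := by
  intro args return_type _
  unfold Spec_generate_cpp_test_inputs_py generate_cpp_test_inputs_py generate_cpp_test_inputs_py_alt
  rw [pvA_fold]
  set base := args.foldl (fun (d : PySem.Dict String String) arg => d.insert arg "0") PySem.Dict.empty with hbase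
  set dA := args.foldl (fun (inputs : PySem.Dict String String) arg => inputs.insert arg (pvChain arg)) PySem.Dict.empty with hdA
  set dB := pvRules.reverse.foldl (fun inputs rule => pvSweep rule inputs) base with hdB
  have hkA : dA.keys = PySem.Set.update PySem.Dict.empty.keys args :=
    PySem.Dict.keys_foldl_insert args _ _
  have hkbase : base.keys = PySem.Set.update PySem.Dict.empty.keys args :=
    PySem.Dict.keys_foldl_insert args _ _
  have hkB : dB.keys = base.keys := pvKeys_sweeps _ _
  have hndA : dA.keys.Nodup := PySem.Dict.nodup_keys_foldl_insert args _ _ PySem.Dict.nodup_keys_empty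
  have hndB : dB.keys.Nodup := by
    rw [hkB]
    exact PySem.Dict.nodup_keys_foldl_insert args _ _ PySem.Dict.nodup_keys_empty
  rw [PySem.Dict.items_eq_map_keys dA hndA "0", PySem.Dict.items_eq_map_keys dB hndB "0",
    hkB, hkbase, ← hkA]
  apply List.map_congr_left
  intro k hk
  have hkargs : k ∈ args := by
    have := hkA ▸ hk
    simpa [PySem.Dict.keys_empty, PySem.Set.update_nil_left, PySem.Set.mem_ofList] using this
  have hA : dA.getD k "0" = pvChain k := pvGetD_fold_insert_mem args pvChain _ k hkargs
  have hbaseK : k ∈ base.keys := by rw [hkbase, ← hkA]; exact hk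
  have hbaseV : base.getD k "0" = "0" := pvGetD_fold_insert_mem args (fun _ => "0") _ k hkargs
  have hB : dB.getD k "0" = pvOverwrite k := by
    rw [hdB, pvGetD_sweeps pvRules.reverse base k hbaseK, hbaseV]; rfl
  rw [hA, hB, pvChain_eq_pvOverwrite]
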